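-- pv_equiv track=rewrite | github.com/tszwong/BU-CS-111 | ps2/ps2pr5.py | process
-- ===== SOURCE A (Python) =====
-- def process(vals):
--     """takes as input a list of 0 or more integers vals
--     and uses recursion to create and return a new list in
--     which each even element of the original list has been
--     tripled and each odd element has been left unchanged"""
--
--     if vals == []:
--         return []
--     else:
--         vals_rest = process(vals[1:])
--         if vals[0] % 2 == 0:
--             tripled_value = [vals[0] * 3]
--             return tripled_value + vals_rest
--         else:
--             return [vals[0]] + vals_rest
-- ===== SOURCE B (Python) =====
-- def process(vals):
--     result = []
--     for x in vals:
--         result.append(x * 3 if x % 2 == 0 else x)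
--     return result
-- ===== Notes on version B (the rewrite author's own statement) =====
-- stated objective: faster
-- what changed: Replaces the head-prepend recursion (which slices vals[1:] and concatenates a fresh list at every level) with a single iterative forward pass appending into an explicit accumulator list.
import Mathlib
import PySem

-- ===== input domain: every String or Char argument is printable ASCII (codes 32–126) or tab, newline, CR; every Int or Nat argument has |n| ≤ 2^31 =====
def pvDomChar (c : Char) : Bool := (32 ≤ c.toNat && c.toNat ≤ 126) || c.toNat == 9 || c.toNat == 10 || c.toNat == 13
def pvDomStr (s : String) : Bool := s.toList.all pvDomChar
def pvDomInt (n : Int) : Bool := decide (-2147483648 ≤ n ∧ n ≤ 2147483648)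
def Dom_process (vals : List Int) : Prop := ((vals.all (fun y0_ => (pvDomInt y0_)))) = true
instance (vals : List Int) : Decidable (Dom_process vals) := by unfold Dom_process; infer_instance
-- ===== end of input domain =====

-- B replaces A's head-prepend recursion with a single iterative accumulator pass (idiomatic loop).


-- ===== PORT A =====
-- Literal transliteration of A's recursion: empty case, recurse on the tail
-- (vals[1:]), then prepend either the tripled head (if even, Python % on a
-- positive divisor agrees with PySem.Int.mod) or the head unchanged.
def process (vals : List Int) : List Int :=
  match vals with
  | [] => []
  | v :: rest =>
    let vals_rest := process rest
    if PySem.Int.mod v 2 = 0 then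
      let tripled_value := [v * 3]
      tripled_value ++ vals_rest
    else
      [v] ++ vals_rest

-- ===== PORT B =====
-- Literal transliteration of B: result = []; for x in vals: result.append(...).
def process_alt (vals : List Int) : List Int :=
  vals.foldl (fun result x =>
    result ++ [if PySem.Int.mod x 2 = 0 then x * 3 else x]) []

-- ===== PRECONDITION & SPEC =====
def Spec_process (vals : List Int) (out : List Int) : Prop := out = process_alt vals
instance (vals : List Int) (out : List Int) : Decidable (Spec_process vals out) := by unfold Spec_process; infer_instance

-- ===== CLAIM (what is proved, stated in full; the proofs are below) =====
def Claim_equal_process : Prop := ∀ (vals : List Int), Dom_process vals → Spec_process vals (process vals)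

-- ===== LEMMAS AND PROOFS =====

-- The accumulator of B's fold factors out to the left.
theorem process_alt_acc (vals : List Int) (acc : List Int) :
    vals.foldl (fun result x =>
      result ++ [if PySem.Int.mod x 2 = 0 then x * 3 else x]) acc
    = acc ++ vals.foldl (fun result x =>
      result ++ [if PySem.Int.mod x 2 = 0 then x * 3 else x]) [] := by
  induction vals generalizing acc with
  | nil => simp
  | cons v rest ih =>
    simp only [List.foldl]
    rw [ih (acc ++ _), ih ([] ++ _)]
    simp

-- ===== VERDICT (by name: the statement is the Claim_ definition above) =====
theorem process_eq_alt (vals : List Int) : process vals = process_alt vals := by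
  induction vals with
  | nil => rfl
  | cons v rest ih =>
    simp only [process, process_alt] at *
    rw [List.foldl, process_alt_acc]
    split_ifs with h <;> simp [ih]

theorem process_spec : Claim_equal_process := by
  intro vals _
  exact process_eq_alt vals
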